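-- pv_equiv track=rewrite | github.com/saenuruki/Codility | EuclideanAlgorithm/chocolatesByNumbers.py | solution
-- ===== SOURCE A (Python) =====
-- def solution(N, M):
--     # 一番シンプルな考え方は、１つずつN個のチョコレートをとっていく（該当のアドレスの値を0にする）
--     # 円状のため、最大でも要素の数分繰り返す (for文で実現)
--     # 作成した配列の値が0の時に繰り返した回数 countを返す
--
--     if M < 1 or M > 1000000000:
--         return 0
--     if N <= 1 or M > 1000000000:
--         return 0
--
--     match_list = [1] * N
--     count = 0
--     prebious_point = 0
--     for index in range(N):
--         current_point =  (prebious_point + M) % N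
--         if match_list[current_point] == 0:
--             return count
--         match_list[current_point] = 0 # 一度遷移したポイントを次回以降踏めないようにする
--         count = count + 1
--         prebious_point = current_point
--
--     return count
-- ===== SOURCE B (Python) =====
-- def solution(N, M):
--     # Eaten chocolates = N / gcd(N, M), computed via the Euclidean algorithm.
--     if M < 1 or M > 1000000000 or N <= 1:
--         return 0
--     a, b = N, M
--     while b:
--         a, b = b, a % b
--     return N // a
-- ===== Notes on version B (the rewrite author's own statement) =====
-- stated objective: faster
-- what changed: Replaced the O(N) circle simulation with a visited list by the closed form N // gcd(N, M) using the Euclidean algorithm.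
import Mathlib
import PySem

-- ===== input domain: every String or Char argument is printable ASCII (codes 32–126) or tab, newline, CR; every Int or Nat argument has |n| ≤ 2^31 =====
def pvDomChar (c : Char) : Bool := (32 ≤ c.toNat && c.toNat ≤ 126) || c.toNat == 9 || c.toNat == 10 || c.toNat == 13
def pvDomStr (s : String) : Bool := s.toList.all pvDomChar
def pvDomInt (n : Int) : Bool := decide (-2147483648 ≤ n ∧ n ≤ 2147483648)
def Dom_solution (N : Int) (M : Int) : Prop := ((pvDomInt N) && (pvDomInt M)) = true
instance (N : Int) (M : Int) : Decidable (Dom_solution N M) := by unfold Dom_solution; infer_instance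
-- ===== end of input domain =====

-- B replaces A's O(N) circle simulation by the closed form N // gcd(N, M) (Euclidean algorithm).

-- ===== PORT A =====
-- the for-loop over range(N), fuel = number of remaining iterations; state = (match_list, count, prebious_point)
def solutionLoop (N M : Int) : Nat → List Int → Int → Int → Int
  | 0, _, count, _ => count
  | f + 1, match_list, count, prebious_point =>
    let current_point := PySem.Int.mod (prebious_point + M) N
    if (PySem.List.pyGet? match_list current_point).getD 0 = 0 then count
    else solutionLoop N M f (match_list.set current_point.toNat 0) (count + 1) current_point

def solution (N : Int) (M : Int) : Int :=
  if M < 1 ∨ M > 1000000000 then 0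
  else if N ≤ 1 ∨ M > 1000000000 then 0
  else solutionLoop N M N.toNat (List.replicate N.toNat 1) 0 0

-- ===== PORT B =====
-- while b: a, b = b, a % b   (Python % via PySem.Int.mod)
def euclid (a b : Int) : Int :=
  if hb : b = 0 then a else euclid b (PySem.Int.mod a b)
termination_by b.natAbs
decreasing_by
  have h := PySem.Int.floordiv_mul_add_mod a b
  rcases lt_or_gt_of_ne hb with hneg | hpos
  · have h1 := PySem.Int.mod_neg_bounds a hneg
    omega
  · have h1 : 0 ≤ PySem.Int.mod a b := PySem.Int.mod_nonneg a hpos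
    have h2 : PySem.Int.mod a b < b := PySem.Int.mod_lt a hpos
    omega

def solution_alt (N : Int) (M : Int) : Int :=
  if M < 1 ∨ M > 1000000000 ∨ N ≤ 1 then 0
  else PySem.Int.floordiv N (euclid N M)

-- ===== PRECONDITION & SPEC =====
def Spec_solution (N : Int) (M : Int) (out : Int) : Prop := out = solution_alt N M
instance (N : Int) (M : Int) (out : Int) : Decidable (Spec_solution N M out) := by unfold Spec_solution; infer_instance

-- ===== CLAIM (what is proved, stated in full; the proofs are below) =====
def Claim_equal_solution : Prop := ∀ (N : Int) (M : Int), Dom_solution N M → Spec_solution N M (solution N M)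

-- ===== LEMMAS AND PROOFS =====

-- euclid on nonnegative inputs computes Nat.gcd
theorem euclid_eq_gcd (b a : Nat) : euclid (a : Int) (b : Int) = (Nat.gcd a b : Int) := by
  induction b using Nat.strong_induction_on generalizing a with
  | _ b ih =>
    rcases Nat.eq_zero_or_pos b with hb | hb
    · subst hb; rw [euclid]; simp
    · rw [euclid]
      have hbne : (b : Int) ≠ 0 := by exact_mod_cast Nat.pos_iff_ne_zero.mp hb
      rw [dif_neg hbne, PySem.Int.mod_natCast]
      rw [ih (a % b) (Nat.mod_lt a hb) b]
      rw [Nat.gcd_comm a b, Nat.gcd_rec b a, Nat.gcd_comm]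

-- the key divisibility fact:  n ∣ c*m  ↔  n/gcd(n,m) ∣ c
theorem dvd_mul_iff_div_gcd_dvd (n m c : Nat) (hn : 0 < n) :
    n ∣ c * m ↔ (n / Nat.gcd n m) ∣ c := by
  set g := Nat.gcd n m with hg
  have hgpos : 0 < g := Nat.gcd_pos_of_pos_left m hn
  have hng : (n / g) * g = n := Nat.div_mul_cancel (Nat.gcd_dvd_left n m)
  have hmg : (m / g) * g = m := Nat.div_mul_cancel (Nat.gcd_dvd_right n m)
  have hcop : Nat.Coprime (n / g) (m / g) := Nat.coprime_div_gcd_div_gcd hgpos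
  constructor
  · intro h
    have h2 : (n / g) * g ∣ (c * (m / g)) * g := by
      calc (n / g) * g = n := hng
        _ ∣ c * m := h
        _ = (c * (m / g)) * g := by rw [Nat.mul_assoc, hmg]
    have h3 : (n / g) ∣ c * (m / g) := (Nat.mul_dvd_mul_iff_right hgpos).mp h2
    exact (Nat.Coprime.dvd_of_dvd_mul_right hcop) h3
  · intro h
    calc n = (n / g) * g := hng.symm
      _ ∣ c * g := Nat.mul_dvd_mul_right h g
      _ ∣ c * m := Nat.mul_dvd_mul_left c (Nat.gcd_dvd_right n m)

-- multiples of m coincide mod n iff n/gcd divides the index difference (i ≥ j)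
theorem mult_mod_eq_iff (n m i j : Nat) (hn : 0 < n) (hij : j ≤ i) :
    i * m % n = j * m % n ↔ (n / Nat.gcd n m) ∣ (i - j) := by
  rw [← dvd_mul_iff_div_gcd_dvd n m (i - j) hn]
  constructor
  · intro h
    have h2 : Nat.ModEq n (j * m) (i * m) := h.symm
    have h3 : n ∣ i * m - j * m := (Nat.modEq_iff_dvd' (Nat.mul_le_mul_right m hij)).mp h2
    rwa [← Nat.sub_mul] at h3
  · intro h
    rw [Nat.sub_mul] at h
    have := (Nat.modEq_iff_dvd' (Nat.mul_le_mul_right m hij)).mpr h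
    exact this.symm

-- was position j visited during the first t iterations? (positions i*m % n, 1 ≤ i ≤ t)
def hit (n m t j : Nat) : Bool :=
  (List.range (t + 1)).any (fun i => decide (1 ≤ i) && decide (i * m % n = j))

theorem hit_iff (n m t j : Nat) :
    hit n m t j = true ↔ ∃ i, 1 ≤ i ∧ i ≤ t ∧ i * m % n = j := by
  simp only [hit, List.any_eq_true, List.mem_range, Nat.lt_succ_iff, Bool.and_eq_true,
    decide_eq_true_eq]
  constructor
  · rintro ⟨i, h1, h2, h3⟩; exact ⟨i, h2, h1, h3⟩
  · rintro ⟨i, h1, h2, h3⟩; exact ⟨i, h2, h1, h3⟩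

-- snapshot of match_list after t loop iterations
def marks (n m t : Nat) : List Int :=
  (List.range n).map (fun j => if hit n m t j then (0 : Int) else 1)

theorem marks_length (n m t : Nat) : (marks n m t).length = n := by
  simp [marks]

theorem marks_get (n m t j : Nat) (hj : j < n) :
    (marks n m t)[j]? = some (if hit n m t j then (0 : Int) else 1) := by
  simp [marks, hj]

theorem marks_zero (n m : Nat) : marks n m 0 = List.replicate n 1 := by
  apply List.ext_getElem
  · simp [marks]
  · intro j hj1 hj2
    simp only [marks, List.getElem_map, List.getElem_range, List.getElem_replicate]
    rw [if_neg]
    simp only [hit_iff, not_exists]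
    intro i; omega

theorem hit_succ (n m t j : Nat) :
    hit n m (t + 1) j = (hit n m t j || decide ((t + 1) * m % n = j)) := by
  rw [Bool.eq_iff_iff]
  simp only [Bool.or_eq_true, decide_eq_true_eq, hit_iff]
  constructor
  · rintro ⟨i, h1, h2, h3⟩
    rcases Nat.lt_or_ge i (t + 1) with hlt | hge
    · exact Or.inl ⟨i, h1, by omega, h3⟩
    · have : i = t + 1 := by omega
      subst this; exact Or.inr h3
  · rintro (⟨i, h1, h2, h3⟩ | h)
    · exact ⟨i, h1, by omega, h3⟩
    · exact ⟨t + 1, by omega, le_refl _, h⟩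

theorem marks_set (n m t : Nat) (hn : 0 < n) :
    (marks n m t).set ((t + 1) * m % n) 0 = marks n m (t + 1) := by
  apply List.ext_getElem
  · simp [marks]
  · intro j hj1 hj2
    have hjn : j < n := by simpa [marks] using hj2
    have hlen : j < (marks n m t).length := by simpa [marks_length]
    rw [List.getElem_set]
    simp only [marks, List.getElem_map, List.getElem_range, hit_succ]
    by_cases hc : (t + 1) * m % n = j
    · simp [hc]
    · simp [hc]

-- one unfolded iteration of the loop, in terms of marks/hit
theorem loop_step (n m t : Nat) (hn : 0 < n) (f : Nat) :
    solutionLoop (n : Int) (m : Int) (f + 1) (marks n m t) (t : Int) ((t * m % n : Nat) : Int) =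
      (if hit n m t ((t + 1) * m % n) then (t : Int)
       else solutionLoop (n : Int) (m : Int) f (marks n m (t + 1)) ((t : Int) + 1)
              (((t + 1) * m % n : Nat) : Int)) := by
  have hc : PySem.Int.mod (((t * m % n : Nat) : Int) + (m : Int)) (n : Int)
      = (((t + 1) * m % n : Nat) : Int) := by
    rw [← Nat.cast_add, PySem.Int.mod_natCast]
    rw [Nat.mod_add_mod, ← Nat.succ_mul]
  rw [solutionLoop]
  simp only [hc, PySem.List.pyGet?_natCast,
    marks_get n m t ((t + 1) * m % n) (Nat.mod_lt _ hn), Option.getD_some, Int.toNat_natCast]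
  by_cases h : hit n m t ((t + 1) * m % n)
  · simp [h]
  · simp only [h, if_false, Bool.false_eq_true, if_neg (by norm_num : ¬ (1 : Int) = 0)]
    rw [marks_set n m t hn]

-- main loop invariant: from count t the loop ends with n / gcd(n,m)
theorem loop_inv (n m : Nat) (hn : 2 ≤ n) (hm : 1 ≤ m) :
    ∀ d t, t + d = n / Nat.gcd n m →
    solutionLoop (n : Int) (m : Int) (n - t) (marks n m t) (t : Int) ((t * m % n : Nat) : Int)
      = ((n / Nat.gcd n m : Nat) : Int) := by
  have hn0 : 0 < n := by omega
  set g := Nat.gcd n m with hg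
  have hgpos : 0 < g := Nat.gcd_pos_of_pos_left m hn0
  set k := n / g with hk
  have hkg : k * g = n := Nat.div_mul_cancel (Nat.gcd_dvd_left n m)
  have hk1 : 1 ≤ k := Nat.div_pos (Nat.le_of_dvd hn0 (Nat.gcd_dvd_left n m)) hgpos
  have hkn : k ≤ n := Nat.div_le_self n g
  intro d
  induction d with
  | zero =>
    intro t ht
    have ht' : t = k := by omega
    subst ht'
    rcases Nat.eq_or_lt_of_le hkn with he | hlt
    · -- k = n : the loop runs out of fuel and returns count = n
      rw [he]
      simp [solutionLoop]
    · -- k < n : the next point (k+1)*m % n = m % n was already visited (i = 1)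
      have hf : n - k = (n - k - 1) + 1 := by omega
      rw [hf, loop_step n m k hn0]
      rw [if_pos ((hit_iff n m k ((k + 1) * m % n)).mpr
        ⟨1, le_refl _, hk1,
          ((mult_mod_eq_iff n m (k + 1) 1 hn0 (by omega)).mpr (by simp only [Nat.add_sub_cancel]; exact dvd_refl k)).symm⟩)]
  | succ d ih =>
    intro t ht
    have htk : t < k := by omega
    have hf : n - t = (n - (t + 1)) + 1 := by omega
    rw [hf, loop_step n m t hn0]
    rw [if_neg ?_]
    · have := ih (t + 1) (by omega)
      rw [← this]
      norm_cast
    · rw [hit_iff]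
      push_neg
      intro i h1 h2 h3
      have hdvd : k ∣ (t + 1 - i) := (mult_mod_eq_iff n m (t + 1) i hn0 (by omega)).mp h3.symm
      have := Nat.le_of_dvd (by omega) hdvd
      omega

-- ===== VERDICT (by name: the statement is the Claim_ definition above) =====
theorem solution_spec : Claim_equal_solution := by
  unfold Claim_equal_solution
  intro N M _
  unfold Spec_solution solution solution_alt
  by_cases hM : M < 1 ∨ M > 1000000000
  · rw [if_pos hM, if_pos (by tauto)]
  · rw [if_neg hM]
    by_cases hN : N ≤ 1 ∨ M > 1000000000
    · rw [if_pos hN, if_pos (by tauto)]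
    · rw [if_neg hN, if_neg (by tauto)]
      push_neg at hM hN
      obtain ⟨hM1, _⟩ := hM
      have hN2 : 2 ≤ N := by omega
      set n := N.toNat with hn
      set m := M.toNat with hm
      have hNn : N = (n : Int) := by omega
      have hMm : M = (m : Int) := by omega
      have hn2 : 2 ≤ n := by omega
      have hm1 : 1 ≤ m := by omega
      rw [hNn, hMm, euclid_eq_gcd, PySem.Int.floordiv_natCast]
      have h0 : (List.replicate n (1 : Int)) = marks n m 0 := (marks_zero n m).symm
      have h1 : (0 : Int) = ((0 * m % n : Nat) : Int) := by simp
      rw [h0]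
      calc solutionLoop (n : Int) (m : Int) n (marks n m 0) 0 0
          = solutionLoop (n : Int) (m : Int) (n - 0) (marks n m 0) ((0 : Nat) : Int)
              ((0 * m % n : Nat) : Int) := by norm_num
        _ = ((n / Nat.gcd n m : Nat) : Int) :=
            loop_inv n m hn2 hm1 (n / Nat.gcd n m) 0 (by omega)
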